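-- pv_equiv track=rewrite | github.com/cstuartroe/misc | Python/31EDO/find_scales.py | find_canon_rotation
-- ===== SOURCE A (Python) =====
-- def scale_weight(scale, start=0):
--     total = 0
--     for j in range(len(scale)):
--         total += j * scale[(start + j) % len(scale)]
--     return total
--
-- def find_canon_rotation(scale):
--     best_total = 10000
--     best_rotation = None
--
--     for i in range(len(scale)):
--         total = scale_weight(scale, i)
--         if total < best_total:
--             best_total = total
--             best_rotation = i
--
--     return scale[best_rotation:] + scale[:best_rotation]
-- ===== SOURCE B (Python) =====
-- def find_canon_rotation(scale):
--     n = len(scale)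
--     s = sum(scale)
--     w = sum(j * x for j, x in enumerate(scale))
--     best_total = 10000
--     best_rotation = None
--     for i in range(n):
--         if i:
--             w += n * scale[i - 1] - s
--         if w < best_total:
--             best_total = w
--             best_rotation = i
--     return scale[best_rotation:] + scale[:best_rotation]
-- ===== Notes on version B (the rewrite author's own statement) =====
-- stated objective: faster
-- what changed: B replaces A's per-rotation O(n) weight recomputation (scale_weight called for every start) with the incremental recurrence weight(i) = weight(i-1) + n*scale[i-1] - sum(scale), a single pass over the rotations.
import Mathlib
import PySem

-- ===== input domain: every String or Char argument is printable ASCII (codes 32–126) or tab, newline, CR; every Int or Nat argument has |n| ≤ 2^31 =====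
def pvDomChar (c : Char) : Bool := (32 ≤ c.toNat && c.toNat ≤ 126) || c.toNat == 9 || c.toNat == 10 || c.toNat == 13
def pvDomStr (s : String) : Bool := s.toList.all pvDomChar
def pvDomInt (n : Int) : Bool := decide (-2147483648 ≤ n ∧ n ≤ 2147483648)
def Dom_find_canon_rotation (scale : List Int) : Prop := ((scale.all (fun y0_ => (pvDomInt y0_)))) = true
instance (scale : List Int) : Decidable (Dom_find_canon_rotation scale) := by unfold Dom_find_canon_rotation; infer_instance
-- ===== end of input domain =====

-- B computes each rotation's weight incrementally (weight(i+1) = weight(i) + n*scale[i] - sum(scale)),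
-- one pass instead of A's per-rotation rescan; selection (incl. the 10000 threshold) is unchanged.

-- ===== PORT A =====
def scale_weight (scale : List Int) (start : Int) : Int :=
  (List.range scale.length).foldl
    (fun (total : Int) (j : Nat) =>
      total + (j : Int) * PySem.List.pyGetD scale (PySem.Int.mod (start + (j : Int)) (scale.length : Int)) 0)
    0

def find_canon_rotation (scale : List Int) : List Int :=
  let st := (List.range scale.length).foldl
    (fun (b : Int × Option Int) (i : Nat) =>
      let total := scale_weight scale (i : Int)
      if total < b.1 then (total, some (i : Int)) else b)
    (10000, none)
  -- scale[best_rotation:] + scale[:best_rotation]  (best_rotation may still be None: a None bound is an open slice)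
  PySem.List.slice scale st.2 none ++ PySem.List.slice scale none st.2

-- ===== PORT B =====
def find_canon_rotation_alt (scale : List Int) : List Int :=
  let n := scale.length
  let s := scale.sum
  let w0 := ((PySem.List.enumerate scale 0).map (fun p => p.1 * p.2)).sum
  let res := (PySem.List.pyRange 0 (n : Int) 1).foldl
    (fun (st : Int × Int × Option Int) i =>
      let w := if i ≠ 0 then st.1 + (n : Int) * PySem.List.pyGetD scale (i - 1) 0 - s else st.1
      if w < st.2.1 then (w, w, some i) else (w, st.2.1, st.2.2))
    (w0, 10000, none)
  PySem.List.slice scale res.2.2 none ++ PySem.List.slice scale none res.2.2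

-- ===== PRECONDITION & SPEC =====
def Spec_find_canon_rotation (scale : List Int) (out : List Int) : Prop :=
  out = find_canon_rotation_alt scale
instance (scale : List Int) (out : List Int) : Decidable (Spec_find_canon_rotation scale out) := by
  unfold Spec_find_canon_rotation; infer_instance

-- ===== CLAIM (what is proved, stated in full; the proofs are below) =====
def Claim_equal_find_canon_rotation : Prop := ∀ (scale : List Int), Dom_find_canon_rotation scale → Spec_find_canon_rotation scale (find_canon_rotation scale)

-- ===== LEMMAS AND PROOFS =====

-- rotWeight l = sum over j of j * l[j], written as the sum of the proper suffix sums
def rotWeight : List Int → Int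
  | [] => 0
  | _ :: t => rotWeight t + t.sum

-- list sum as an indexed sum
theorem sum_eq_sum_getD (l : List Int) :
    l.sum = ((List.range l.length).map (fun (j : Nat) => l.getD j 0)).sum := by
  induction l with
  | nil => simp
  | cons a t ih =>
    simp [List.range_succ_eq_map, List.map_map, Function.comp_def, ih]

-- rotWeight l = Σ_{j < |l|} j * l[j]
theorem rotWeight_eq_sum (l : List Int) :
    rotWeight l = ((List.range l.length).map (fun (j : Nat) => (j : Int) * l.getD j 0)).sum := by
  induction l with
  | nil => simp [rotWeight]
  | cons a t ih =>
    rw [rotWeight, ih, sum_eq_sum_getD t]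
    simp only [List.length_cons, List.range_succ_eq_map, List.map_cons, List.map_map,
      Function.comp_def, List.sum_cons]
    rw [← PySem.List.sum_map_add_int]
    simp [add_mul, add_comm]

-- appending at the right end shifts the weight by length * x
theorem rotWeight_append_singleton (l : List Int) (x : Int) :
    rotWeight (l ++ [x]) = rotWeight l + (l.length : Int) * x := by
  induction l with
  | nil => simp [rotWeight]
  | cons a t ih =>
    simp only [List.cons_append, rotWeight, ih, List.sum_append, List.sum_cons, List.sum_nil,
      List.length_cons]
    push_cast; ring

-- the incremental recurrence behind B
theorem rotWeight_rotate_succ (scale : List Int) (h : scale ≠ []) (i : Nat) :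
    rotWeight (scale.rotate (i + 1)) =
      rotWeight (scale.rotate i) + (scale.length : Int) * scale.getD (i % scale.length) 0 - scale.sum := by
  have hlen : (scale.rotate i).length = scale.length := List.length_rotate ..
  have hne : scale.rotate i ≠ [] := by
    intro hc; apply h; rwa [← List.length_eq_zero_iff, hlen, List.length_eq_zero_iff] at hc
  obtain ⟨x, xs, hx⟩ := List.exists_cons_of_ne_nil hne
  have hrot : scale.rotate (i + 1) = xs ++ [x] := by
    rw [← List.rotate_rotate, hx, List.rotate_cons_succ, List.rotate_zero]
  have hxval : x = scale.getD (i % scale.length) 0 := by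
    have h0 : 0 < (scale.rotate i).length := by rw [hx]; simp
    have h1 := List.getElem_rotate scale i 0 h0
    have h2 : (scale.rotate i)[0]'h0 = x := by simp [hx]
    have h3 : (0 + i) % scale.length < scale.length := by
      apply Nat.mod_lt; rw [← hlen]; exact h0
    rw [h2] at h1
    rw [List.getD_eq_getElem _ _ (by simpa using h3), h1]
    simp
  have hsum : (x :: xs).sum = scale.sum := by
    rw [← hx]; exact (List.rotate_perm scale i).sum_eq
  have hlenx : scale.length = xs.length + 1 := by
    rw [← hlen, hx]; simp
  rw [hrot, rotWeight_append_singleton, hx, rotWeight, ← hxval, ← hsum, hlenx]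
  simp only [List.sum_cons]
  push_cast
  ring

-- A's helper computes the rotation weight
theorem scale_weight_eq (scale : List Int) (i : Nat) :
    scale_weight scale (i : Int) = rotWeight (scale.rotate i) := by
  unfold scale_weight
  rcases scale with _ | ⟨a, t⟩
  · simp [rotWeight]
  · set sc := a :: t with hsc
    have hn : 0 < sc.length := by simp [hsc]
    rw [PySem.List.foldl_add (g := fun (j : Nat) => (j : Int) * PySem.List.pyGetD sc (PySem.Int.mod ((i : Int) + (j : Int)) (sc.length : Int)) 0),
      rotWeight_eq_sum, List.length_rotate, zero_add]
    apply congrArg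
    apply List.map_congr_left
    intro j hj
    have hj' : j < sc.length := List.mem_range.mp hj
    have hmod : PySem.Int.mod ((i : Int) + (j : Int)) (sc.length : Int) = (((i + j) % sc.length : Nat) : Int) := by
      rw [(by push_cast; ring : (i : Int) + (j : Int) = ((i + j : Nat) : Int))]
      exact PySem.Int.mod_natCast _ _
    rw [hmod, PySem.List.pyGetD_natCast]
    have hlt : (i + j) % sc.length < sc.length := Nat.mod_lt _ hn
    have hjr : j < (sc.rotate i).length := by rwa [List.length_rotate]
    rw [List.getD_eq_getElem _ _ hjr, List.getD_eq_getElem _ _ hlt, List.getElem_rotate]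
    simp [Nat.add_comm]

-- the shared selection step, over precomputed rotation weights
def stepA (w : Nat → Int) (b : Int × Option Int) (i : Nat) : Int × Option Int :=
  if w i < b.1 then (w i, some (i : Int)) else b

-- A's search loop is the abstract selection over the rotation weights
theorem A_fold_eq (scale : List Int) :
    (List.range scale.length).foldl
      (fun (b : Int × Option Int) (i : Nat) =>
        if scale_weight scale (i : Int) < b.1 then (scale_weight scale (i : Int), some (i : Int)) else b)
      (10000, none)
    = (List.range scale.length).foldl (stepA (fun i => rotWeight (scale.rotate i))) (10000, none) := by
  have hf : (fun (b : Int × Option Int) (i : Nat) =>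
        if scale_weight scale (i : Int) < b.1 then (scale_weight scale (i : Int), some (i : Int)) else b)
      = stepA (fun i => rotWeight (scale.rotate i)) := by
    funext b i
    simp only [stepA, scale_weight_eq]
  rw [hf]

-- B's initial weight is the weight of rotation 0
theorem w0_eq (scale : List Int) :
    ((PySem.List.enumerate scale 0).map (fun p => p.1 * p.2)).sum = rotWeight (scale.rotate 0) := by
  rw [List.rotate_zero, rotWeight_eq_sum,
    PySem.List.enumerate_eq_map_pyRange (xs := scale) 0]
  simp only [PySem.List.len_eq]
  rw [PySem.List.pyRange_zero_nat, List.map_map, List.map_map]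
  apply congrArg
  apply List.map_congr_left
  intro j hj
  simp [Function.comp_def, PySem.List.pyGetD_natCast]

-- B's loop threads the running weight; projected to the selection state it is A's selection fold
theorem B_fold_eq (scale : List Int) (h : scale ≠ []) (m : Nat) (hm : m ≤ scale.length)
    (sb : Int × Option Int) :
    (List.range m).foldl
      (fun (st : Int × Int × Option Int) (k : Nat) =>
        if ((if (k : Int) ≠ 0 then st.1 + (scale.length : Int) * PySem.List.pyGetD scale ((k : Int) - 1) 0 - scale.sum else st.1)) < st.2.1
        then ((if (k : Int) ≠ 0 then st.1 + (scale.length : Int) * PySem.List.pyGetD scale ((k : Int) - 1) 0 - scale.sum else st.1),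
              (if (k : Int) ≠ 0 then st.1 + (scale.length : Int) * PySem.List.pyGetD scale ((k : Int) - 1) 0 - scale.sum else st.1),
              some (k : Int))
        else ((if (k : Int) ≠ 0 then st.1 + (scale.length : Int) * PySem.List.pyGetD scale ((k : Int) - 1) 0 - scale.sum else st.1),
              st.2.1, st.2.2))
      (rotWeight (scale.rotate 0), sb)
    = (rotWeight (scale.rotate (m - 1)),
       (List.range m).foldl (stepA (fun i => rotWeight (scale.rotate i))) sb) := by
  induction m generalizing sb with
  | zero => simp
  | succ m ih =>
    have hm' : m ≤ scale.length := by omega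
    rw [List.range_succ, List.foldl_append, List.foldl_append, ih hm' sb]
    simp only [List.foldl_cons, List.foldl_nil]
    have hw : (if (m : Int) ≠ 0 then
          rotWeight (scale.rotate (m - 1)) + (scale.length : Int) * PySem.List.pyGetD scale ((m : Int) - 1) 0 - scale.sum
        else rotWeight (scale.rotate (m - 1)))
        = rotWeight (scale.rotate m) := by
      rcases Nat.eq_zero_or_pos m with hm0 | hm0
      · subst hm0; simp
      · have hk : ((m : Int) ≠ 0) := by omega
        rw [if_pos hk]
        have hg : PySem.List.pyGetD scale ((m : Int) - 1) 0 = scale.getD ((m - 1) % scale.length) 0 := by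
          rw [(by omega : (m : Int) - 1 = ((m - 1 : Nat) : Int)), PySem.List.pyGetD_natCast]
          rw [Nat.mod_eq_of_lt (by omega)]
        rw [hg, ← rotWeight_rotate_succ scale h (m - 1), (by omega : m - 1 + 1 = m)]
    rw [hw]
    simp only [stepA, Nat.add_sub_cancel]
    split_ifs <;> rfl

-- ===== VERDICT (by name: the statement is the Claim_ definition above) =====
theorem find_canon_rotation_spec : Claim_equal_find_canon_rotation := by
  intro scale _
  show find_canon_rotation scale = find_canon_rotation_alt scale
  rcases scale with _ | ⟨a, t⟩
  · decide
  · set sc := a :: t with hsc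
    have hne : sc ≠ [] := by simp [hsc]
    simp only [find_canon_rotation, find_canon_rotation_alt]
    rw [A_fold_eq sc, w0_eq sc, PySem.List.pyRange_zero_nat, List.foldl_map,
      B_fold_eq sc hne sc.length (le_refl _) (10000, none)]
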